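-- pv_equiv track=rewrite | github.com/lehgtrung/two-are-better-than-one | asp_solver/asp.py | find_word_position
-- ===== SOURCE A (Python) =====
-- def find_word_position(tokens, word):
--     word = word.split('_')
--     n = len(tokens)
--     m = len(word)
--     for i in range(n - m + 1):
--         if tokens[i] == word[0]:
--             if tokens[i + 1:i + m] == word[1:]:
--                 return i, i + m
-- ===== SOURCE B (Python) =====
-- def find_word_position(tokens, word):
--     w = word.split('_')
--     m = len(w)
--     # KMP failure table: fail[q] = length of longest proper border of w[:q+1]
--     fail = [0] * m
--     k = 0
--     for q in range(1, m):
--         while k > 0 and w[q] != w[k]: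
--             k = fail[k - 1]
--         if w[q] == w[k]:
--             k += 1
--         fail[q] = k
--     # KMP scan
--     q = 0
--     for i, tok in enumerate(tokens):
--         while q > 0 and tok != w[q]:
--             q = fail[q - 1]
--         if tok == w[q]:
--             q += 1
--         if q == m:
--             return i - m + 1, i + 1
--     return None
-- ===== Notes on version B (the rewrite author's own statement) =====
-- stated objective: alternative
-- what changed: Replaces A's naive scan (try every start position, compare a fresh slice there) by Knuth-Morris-Pratt matching: a precomputed failure table and a single left-to-right pass that never backs up in the token list (worst-case O(n+m) vs A's O(n*m); not measurably faster on the generated inputs).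
import Mathlib
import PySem

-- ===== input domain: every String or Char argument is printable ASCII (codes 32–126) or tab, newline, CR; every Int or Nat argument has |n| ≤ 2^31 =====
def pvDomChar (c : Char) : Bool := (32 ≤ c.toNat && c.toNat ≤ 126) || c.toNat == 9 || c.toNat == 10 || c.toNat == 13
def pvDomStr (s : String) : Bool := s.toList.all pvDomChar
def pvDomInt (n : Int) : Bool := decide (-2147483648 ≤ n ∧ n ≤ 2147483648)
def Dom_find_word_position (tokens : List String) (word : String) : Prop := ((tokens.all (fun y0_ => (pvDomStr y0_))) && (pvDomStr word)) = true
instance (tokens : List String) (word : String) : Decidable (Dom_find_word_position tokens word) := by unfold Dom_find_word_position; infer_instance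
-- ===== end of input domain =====

-- B replaces A's restart-on-mismatch candidate scan (compare a slice at every start) by the
-- Knuth–Morris–Pratt automaton: a precomputed failure table and one left-to-right pass.

-- ===== PORT A =====
-- the 'for i in range(n - m + 1)' loop with its early return
def fwpLoopA (tokens w : List String) (m : Int) : List Int → Option (Int × Int)
  | [] => none
  | i :: rest =>
    if PySem.List.pyGet? tokens i = PySem.List.pyGet? w 0 then   -- tokens[i] == word[0] (always in range in Python)
      if PySem.List.slice tokens (some (i + 1)) (some (i + m)) = PySem.List.slice w (some 1) none
      then some (i, i + m)                     -- return i, i + m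
      else fwpLoopA tokens w m rest
    else fwpLoopA tokens w m rest

def find_word_position (tokens : List String) (word : String) : Option (Int × Int) :=
  let w := (PySem.Chars.splitOn word.toList ['_']).map String.ofList   -- word = word.split('_'); '_' ≠ '' so split never raises
  let n : Int := tokens.length
  let m : Int := w.length
  fwpLoopA tokens w m (PySem.List.pyRange 0 (n - m + 1) 1)

-- ===== PORT B =====
-- 'while k > 0 and x != w[k]: k = fail[k-1]'.  fuel (= the initial k) only makes the recursion
-- structural: the table built below satisfies fail[j] ≤ j, so k strictly decreases and fuel ≥ k
-- iterations reproduce the Python while loop exactly.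
def kmpSpin (w : List String) (fail : List Nat) (x : String) : Nat → Nat → Nat
  | 0, k => k
  | fuel + 1, k =>
    if 0 < k ∧ x ≠ w.getD k "" then kmpSpin w fail x fuel (fail.getD (k - 1) 0) else k

-- the failure-table loop 'for q in range(1, m)'.  Python preallocates fail = [0]*m and writes
-- fail[q] at iteration q, in index order, before any read of that cell; the port keeps the
-- written prefix of the table (same cells, same values) and appends each new entry.
def kmpFail (w : List String) : List Nat :=
  (((List.range w.length).drop 1).foldl
    (fun (s : List Nat × Nat) q =>
      let k := kmpSpin w s.1 (w.getD q "") s.2 s.2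
      let k := if w.getD q "" = w.getD k "" then k + 1 else k
      (s.1 ++ [k], k))
    (List.replicate (min w.length 1) 0, 0)).1

-- the scan 'for i, tok in enumerate(tokens)' with its early return
def kmpScan (w : List String) (fail : List Nat) (m : Nat) : List String → Int → Nat → Option (Int × Int)
  | [], _, _ => none
  | tok :: rest, i, q =>
    let q1 := kmpSpin w fail tok q q
    let q2 := if tok = w.getD q1 "" then q1 + 1 else q1
    if q2 = m then some (i - (m : Int) + 1, i + 1)
    else kmpScan w fail m rest (i + 1) q2

def find_word_position_alt (tokens : List String) (word : String) : Option (Int × Int) :=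
  let w := (PySem.Chars.splitOn word.toList ['_']).map String.ofList   -- w = word.split('_')
  let m := w.length
  let fail := kmpFail w
  kmpScan w fail m tokens 0 0

-- ===== PRECONDITION & SPEC =====
def Spec_find_word_position (tokens : List String) (word : String) (out : Option (Int × Int)) : Prop := out = find_word_position_alt tokens word
instance (tokens : List String) (word : String) (out : Option (Int × Int)) : Decidable (Spec_find_word_position tokens word out) := by unfold Spec_find_word_position; infer_instance

-- ===== CLAIM (what is proved, stated in full; the proofs are below) =====
def Claim_equal_find_word_position : Prop := ∀ (tokens : List String) (word : String), Dom_find_word_position tokens word → Spec_find_word_position tokens word (find_word_position tokens word)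

-- ===== LEMMAS AND PROOFS =====

-- ---- generic list facts ----

-- two suffixes of one list: the shorter is a suffix of the longer
theorem pvSuffixOfCommon {α : Type} {l1 l2 l : List α} (h1 : l1 <:+ l) (h2 : l2 <:+ l)
    (hl : l1.length ≤ l2.length) : l1 <:+ l2 := by
  obtain ⟨u, hu⟩ := h1
  obtain ⟨t, ht⟩ := h2
  have hlen : t.length ≤ u.length := by
    have := congrArg List.length (hu.trans ht.symm)
    simp only [List.length_append] at this
    omega
  have h := congrArg (List.drop t.length) (hu.trans ht.symm)
  rw [List.drop_append_of_le_length hlen] at h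
  simp only [List.drop_append] at h
  simp only [Nat.sub_self, List.drop_zero, List.drop_length, List.nil_append] at h
  exact ⟨_, h⟩

-- appending one element on both sides of a suffix
theorem pvConcatSuffixConcat {α : Type} {l1 l2 : List α} {a b : α} :
    (l1 ++ [a]) <:+ (l2 ++ [b]) ↔ a = b ∧ l1 <:+ l2 := by
  rw [← List.reverse_prefix]
  simp only [List.reverse_append, List.reverse_cons, List.reverse_nil, List.nil_append,
    List.cons_append, List.cons_prefix_cons]
  rw [List.reverse_prefix]

theorem pvTakeConcat {w : List String} {k : Nat} (hk : k < w.length) :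
    w.take (k + 1) = w.take k ++ [w.getD k ""] := by
  rw [List.take_add_one, List.getElem?_eq_getElem hk, List.getD_eq_getElem?_getD,
    List.getElem?_eq_getElem hk]
  rfl

theorem pvFindRangeSome {p : Nat → Bool} {N s0 : Nat} (h1 : p s0 = true) (h2 : s0 < N)
    (h3 : ∀ s, s < s0 → p s = false) : (List.range N).find? p = some s0 := by
  induction N with
  | zero => omega
  | succ N ih =>
    rw [List.range_succ, List.find?_append]
    by_cases hs : s0 < N
    · rw [ih hs]; rfl
    · have hN : N = s0 := by omega
      subst hN
      have hnone : (List.range N).find? p = none := by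
        apply List.find?_eq_none.mpr
        intro x hx
        simp [h3 x (List.mem_range.mp hx)]
      rw [hnone]
      simp [List.find?, h1]

theorem pvFindCongr {α : Type} {p q : α → Bool} : ∀ {l : List α}, (∀ x ∈ l, p x = q x) →
    l.find? p = l.find? q := by
  intro l h
  induction l with
  | nil => rfl
  | cons a t ih =>
    have ha := h a (List.mem_cons_self)
    cases hqa : q a with
    | true => simp [ha, hqa]
    | false =>
      simp only [List.find?_cons, ha, hqa]
      exact ih (fun x hx => h x (List.mem_cons_of_mem _ hx))

-- ---- the split result is never empty ----

theorem pvSplitGoNeNil (sep : List Char) : ∀ (fuel : Nat) (l cur : List Char) (acc : List (List Char)),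
    PySem.Chars.splitOn.go sep fuel l cur acc ≠ [] := by
  intro fuel
  induction fuel with
  | zero =>
    intro l cur acc
    rw [PySem.Chars.splitOn.go.eq_def]
    simp
  | succ fuel ih =>
    intro l cur acc
    rw [PySem.Chars.splitOn.go.eq_def]
    cases l with
    | nil => simp
    | cons c rest =>
      simp only []
      split
      · exact ih _ _ _
      · exact ih _ _ _

theorem pvSplitNeNil (s sep : List Char) : PySem.Chars.splitOn s sep ≠ [] := by
  unfold PySem.Chars.splitOn
  exact pvSplitGoNeNil sep _ s [] []

-- ---- borders (pvMb = longest proper border of w.take q) and partial matches (pvMpm) ----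

def pvMb (w : List String) (q : Nat) : Nat :=
  Nat.findGreatest (fun k => k < q ∧ w.take k <:+ w.take q) q

def pvMpm (w p : List String) : Nat :=
  Nat.findGreatest (fun k => w.take k <:+ p) w.length

theorem pvMb_lt {w : List String} {q : Nat} (hq : 1 ≤ q) : pvMb w q < q := by
  have h0 : 0 < q ∧ w.take 0 <:+ w.take q := ⟨hq, by simp⟩
  exact (Nat.findGreatest_spec (P := fun k => k < q ∧ w.take k <:+ w.take q) (Nat.zero_le q) h0).1

theorem pvMb_suffix {w : List String} {q : Nat} (hq : 1 ≤ q) :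
    w.take (pvMb w q) <:+ w.take q := by
  have h0 : 0 < q ∧ w.take 0 <:+ w.take q := ⟨hq, by simp⟩
  exact (Nat.findGreatest_spec (P := fun k => k < q ∧ w.take k <:+ w.take q) (Nat.zero_le q) h0).2

theorem pvMb_max {w : List String} {q k : Nat} (hk : k < q) (hs : w.take k <:+ w.take q) :
    k ≤ pvMb w q :=
  Nat.le_findGreatest (le_of_lt hk) ⟨hk, hs⟩

theorem pvMb_one (w : List String) : pvMb w 1 = 0 := by
  have := pvMb_lt (w := w) (q := 1) le_rfl
  omega

theorem pvMpm_le (w p : List String) : pvMpm w p ≤ w.length :=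
  Nat.findGreatest_le _

theorem pvMpm_suffix (w p : List String) : w.take (pvMpm w p) <:+ p := by
  have h0 : w.take 0 <:+ p := by simp
  exact Nat.findGreatest_spec (P := fun k => w.take k <:+ p) (Nat.zero_le _) h0

theorem pvMpm_max {w p : List String} {k : Nat} (hk : k ≤ w.length) (hs : w.take k <:+ p) :
    k ≤ pvMpm w p :=
  Nat.le_findGreatest hk hs

theorem pvMpm_le_length (w p : List String) : pvMpm w p ≤ p.length := by
  have h := (pvMpm_suffix w p).length_le
  rw [List.length_take] at h
  have := pvMpm_le w p
  omega

theorem pvMpm_nil (w : List String) : pvMpm w [] = 0 := by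
  have := pvMpm_le_length w []
  simpa using this

-- the chain lemma: the proper partial matches inside w.take q are exactly those of w.take (pvMb w q)
theorem pvChain {w : List String} {q : Nat} (hq : 1 ≤ q) (hqm : q ≤ w.length) (k : Nat) :
    (k < q ∧ w.take k <:+ w.take q) ↔ (k ≤ pvMb w q ∧ w.take k <:+ w.take (pvMb w q)) := by
  constructor
  · rintro ⟨hk, hs⟩
    have hle : k ≤ pvMb w q := pvMb_max hk hs
    rcases eq_or_lt_of_le hle with he | hlt
    · exact ⟨he ▸ le_rfl, he ▸ List.suffix_rfl⟩
    · refine ⟨hle, ?_⟩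
      apply pvSuffixOfCommon hs (pvMb_suffix hq)
      have hmb := pvMb_lt (w := w) hq
      simp only [List.length_take]
      omega
  · rintro ⟨hle, hs⟩
    exact ⟨lt_of_le_of_lt hle (pvMb_lt hq), hs.trans (pvMb_suffix hq)⟩

-- ---- correctness of the spin (failure-chain descent) ----

theorem pvSpin_correct {w : List String} {fail : List Nat} {x : String} :
    ∀ (fuel k0 : Nat), k0 ≤ fuel → k0 ≤ w.length →
    (∀ j, 1 ≤ j → j ≤ k0 → fail.getD (j - 1) 0 = pvMb w j) →
    (kmpSpin w fail x fuel k0 ≤ k0 ∧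
     w.take (kmpSpin w fail x fuel k0) <:+ w.take k0 ∧
     (x = w.getD (kmpSpin w fail x fuel k0) "" ∨ kmpSpin w fail x fuel k0 = 0) ∧
     (∀ k, k ≤ k0 → w.take k <:+ w.take k0 → x = w.getD k "" → k ≤ kmpSpin w fail x fuel k0)) := by
  intro fuel
  induction fuel with
  | zero =>
    intro k0 hfuel hm hf
    have hk0 : k0 = 0 := Nat.le_zero.mp hfuel
    subst hk0
    exact ⟨by simp [kmpSpin], by simp [kmpSpin], Or.inr (by simp [kmpSpin]), fun k hk _ _ => hk⟩
  | succ fuel ih =>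
    intro k0 hfuel hm hf
    by_cases hc : 0 < k0 ∧ x ≠ w.getD k0 ""
    · have hmb := pvMb_lt (w := w) (q := k0) hc.1
      have hk1v : fail.getD (k0 - 1) 0 = pvMb w k0 := hf k0 hc.1 le_rfl
      have h1 : kmpSpin w fail x (fuel + 1) k0 = kmpSpin w fail x fuel (pvMb w k0) := by
        rw [kmpSpin, if_pos hc, hk1v]
      obtain ⟨ih1, ih2, ih3, ih4⟩ := ih (pvMb w k0) (by omega) (by omega)
        (fun j hj1 hj2 => hf j hj1 (by omega))
      rw [h1]
      refine ⟨by omega, ih2.trans (pvMb_suffix hc.1), ih3, ?_⟩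
      intro k hk hsk hxk
      have hkne : k ≠ k0 := by rintro rfl; exact hc.2 hxk
      have hchain := (pvChain hc.1 hm k).mp ⟨lt_of_le_of_ne hk hkne, hsk⟩
      exact ih4 k hchain.1 hchain.2 hxk
    · have h1 : kmpSpin w fail x (fuel + 1) k0 = k0 := by rw [kmpSpin, if_neg hc]
      rw [h1]
      refine ⟨le_rfl, List.suffix_rfl, ?_, fun k hk _ _ => hk⟩
      rcases Nat.eq_zero_or_pos k0 with h0 | hpos
      · exact Or.inr h0
      · left; by_contra hne; exact hc ⟨hpos, hne⟩

-- ---- failure table correctness ----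

theorem pvBstep {w : List String} {b Q : Nat} (hb : 1 ≤ b) (hbQ : b ≤ Q) (hQ : Q < w.length) :
    (w.take b <:+ w.take (Q + 1)) ↔
      (w.take (b - 1) <:+ w.take Q ∧ w.getD (b - 1) "" = w.getD Q "") := by
  have e1 : w.take b = w.take (b - 1) ++ [w.getD (b - 1) ""] := by
    rw [← pvTakeConcat (show b - 1 < w.length by omega)]
    congr 1
    omega
  rw [e1, pvTakeConcat hQ, pvConcatSuffixConcat]
  tauto

theorem pvGetDMapMb (w : List String) (Q j : Nat) (h1 : 1 ≤ j) (h2 : j ≤ Q) :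
    ((List.range Q).map (fun i => pvMb w (i + 1))).getD (j - 1) 0 = pvMb w j := by
  have hj : j - 1 < ((List.range Q).map (fun i => pvMb w (i + 1))).length := by
    simp; omega
  rw [List.getD_eq_getElem _ _ hj]
  simp only [List.getElem_map, List.getElem_range]
  congr 1
  omega

theorem pvBuildStep {w : List String} {Q : Nat} (hQ1 : 1 ≤ Q) (hQ : Q < w.length) :
    ((fun (s : List Nat × Nat) q =>
        let k := kmpSpin w s.1 (w.getD q "") s.2 s.2
        let k := if w.getD q "" = w.getD k "" then k + 1 else k
        (s.1 ++ [k], k)) ((List.range Q).map (fun j => pvMb w (j + 1)), pvMb w Q) Q)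
      = ((List.range (Q + 1)).map (fun j => pvMb w (j + 1)), pvMb w (Q + 1)) := by
  have hmb := pvMb_lt (w := w) (q := Q) hQ1
  have hf : ∀ j, 1 ≤ j → j ≤ pvMb w Q →
      ((List.range Q).map (fun i => pvMb w (i + 1))).getD (j - 1) 0 = pvMb w j :=
    fun j hj1 hj2 => pvGetDMapMb w Q j hj1 (by omega)
  obtain ⟨h1, h2, h3, h4⟩ := pvSpin_correct (w := w) (x := w.getD Q "")
    (pvMb w Q) (pvMb w Q) le_rfl (by omega) hf
  have hk2 : (if w.getD Q "" =
        w.getD (kmpSpin w ((List.range Q).map (fun j => pvMb w (j + 1))) (w.getD Q "") (pvMb w Q) (pvMb w Q)) ""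
      then kmpSpin w ((List.range Q).map (fun j => pvMb w (j + 1))) (w.getD Q "") (pvMb w Q) (pvMb w Q) + 1
      else kmpSpin w ((List.range Q).map (fun j => pvMb w (j + 1))) (w.getD Q "") (pvMb w Q) (pvMb w Q))
      = pvMb w (Q + 1) := by
    set r := kmpSpin w ((List.range Q).map (fun j => pvMb w (j + 1))) (w.getD Q "") (pvMb w Q) (pvMb w Q) with hr
    by_cases hx : w.getD Q "" = w.getD r ""
    · rw [if_pos hx]
      apply Nat.le_antisymm
      · apply pvMb_max (show r + 1 < Q + 1 by omega)
        rw [pvBstep (by omega) (by omega) hQ]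
        simp only [Nat.add_sub_cancel]
        exact ⟨h2.trans (pvMb_suffix hQ1), hx.symm⟩
      · by_contra hgt
        push Not at hgt
        have hb1 : 1 ≤ pvMb w (Q + 1) := by omega
        have hbord := pvMb_suffix (w := w) (q := Q + 1) (by omega)
        have hblt := pvMb_lt (w := w) (q := Q + 1) (by omega)
        rw [pvBstep hb1 (by omega) hQ] at hbord
        have hchain := (pvChain hQ1 (le_of_lt hQ) (pvMb w (Q + 1) - 1)).mp ⟨by omega, hbord.1⟩
        have := h4 _ hchain.1 hchain.2 hbord.2.symm
        omega
    · rw [if_neg hx]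
      have hr0 : r = 0 := by
        rcases h3 with h | h
        · exact absurd h hx
        · exact h
      rw [hr0]
      by_contra hne
      have hb1 : 1 ≤ pvMb w (Q + 1) := by omega
      have hbord := pvMb_suffix (w := w) (q := Q + 1) (by omega)
      have hblt := pvMb_lt (w := w) (q := Q + 1) (by omega)
      rw [pvBstep hb1 (by omega) hQ] at hbord
      have hchain := (pvChain hQ1 (le_of_lt hQ) (pvMb w (Q + 1) - 1)).mp ⟨by omega, hbord.1⟩
      have hler := h4 _ hchain.1 hchain.2 hbord.2.symm
      rw [hr0] at hler
      have hb1' : pvMb w (Q + 1) = 1 := by omega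
      apply hx
      rw [hr0]
      have := hbord.2
      rw [hb1'] at this
      simpa using this.symm
  dsimp only
  rw [hk2, List.range_succ, List.map_append]
  simp

theorem pvBuildInv (w : List String) : ∀ Q, 1 ≤ Q → Q ≤ w.length →
    (List.range' 1 (Q - 1)).foldl
      (fun (s : List Nat × Nat) q =>
        let k := kmpSpin w s.1 (w.getD q "") s.2 s.2
        let k := if w.getD q "" = w.getD k "" then k + 1 else k
        (s.1 ++ [k], k))
      ([0], 0)
    = ((List.range Q).map (fun j => pvMb w (j + 1)), pvMb w Q) := by
  intro Q hQ1
  induction Q, hQ1 using Nat.le_induction with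
  | base =>
    intro _
    simp [List.range_one, pvMb_one]
  | succ Q hQ ih =>
    intro hQ2
    have hrange : List.range' 1 (Q + 1 - 1) = List.range' 1 (Q - 1) ++ [Q] := by
      rw [show Q + 1 - 1 = (Q - 1) + 1 by omega, List.range'_concat]
      congr 2
      omega
    rw [hrange, List.foldl_append, ih (by omega), List.foldl_cons, List.foldl_nil]
    exact pvBuildStep hQ (by omega)

theorem pvFail_spec {w : List String} (hw : w ≠ []) :
    kmpFail w = (List.range w.length).map (fun j => pvMb w (j + 1)) := by
  have hm1 : 1 ≤ w.length := List.length_pos_of_ne_nil hw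
  have hdrop : (List.range w.length).drop 1 = List.range' 1 (w.length - 1) := by
    rw [List.range_eq_range', show w.length = (w.length - 1) + 1 by omega, List.range'_succ]
    simp
  unfold kmpFail
  rw [min_eq_right hm1, List.replicate_one, hdrop]
  rw [pvBuildInv w w.length hm1 le_rfl]

theorem pvFail_getD {w : List String} (hw : w ≠ []) {j : Nat} (h1 : 1 ≤ j) (h2 : j ≤ w.length) :
    (kmpFail w).getD (j - 1) 0 = pvMb w j := by
  rw [pvFail_spec hw]
  exact pvGetDMapMb w w.length j h1 h2

-- ---- one scan step computes pvMpm of the extended prefix ----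

theorem pvScanStep {w p : List String} {x : String} (hw : w ≠ [])
    (hq : pvMpm w p < w.length) :
    (if x = w.getD (kmpSpin w (kmpFail w) x (pvMpm w p) (pvMpm w p)) ""
     then kmpSpin w (kmpFail w) x (pvMpm w p) (pvMpm w p) + 1
     else kmpSpin w (kmpFail w) x (pvMpm w p) (pvMpm w p)) = pvMpm w (p ++ [x]) := by
  have hf : ∀ j, 1 ≤ j → j ≤ pvMpm w p → (kmpFail w).getD (j - 1) 0 = pvMb w j :=
    fun j hj1 hj2 => pvFail_getD hw hj1 (by omega)
  obtain ⟨h1, h2, h3, h4⟩ := pvSpin_correct (w := w) (x := x)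
    (pvMpm w p) (pvMpm w p) le_rfl (by omega) hf
  set r := kmpSpin w (kmpFail w) x (pvMpm w p) (pvMpm w p) with hr
  have hqsuf : w.take (pvMpm w p) <:+ p := pvMpm_suffix w p
  have hcand : ∀ k, k ≤ pvMpm w p → w.take k <:+ p → w.take k <:+ w.take (pvMpm w p) := by
    intro k hk hs
    apply pvSuffixOfCommon hs hqsuf
    simp only [List.length_take]
    omega
  have hstep1 : ∀ b, 1 ≤ b → b ≤ w.length →
      ((w.take b <:+ (p ++ [x])) ↔ (w.take (b - 1) <:+ p ∧ w.getD (b - 1) "" = x)) := by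
    intro b hb1 hb2
    rw [show w.take b = w.take (b - 1) ++ [w.getD (b - 1) ""] by
      rw [← pvTakeConcat (show b - 1 < w.length by omega)]; congr 1; omega]
    rw [pvConcatSuffixConcat]
    tauto
  by_cases hx : x = w.getD r ""
  · rw [if_pos hx]
    apply Nat.le_antisymm
    · apply pvMpm_max (show r + 1 ≤ w.length by omega)
      rw [hstep1 (r + 1) (by omega) (by omega)]
      simp only [Nat.add_sub_cancel]
      exact ⟨h2.trans hqsuf, hx.symm⟩
    · by_contra hgt
      push Not at hgt
      have hbsuf := pvMpm_suffix w (p ++ [x])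
      have hble := pvMpm_le w (p ++ [x])
      rw [hstep1 (pvMpm w (p ++ [x])) (by omega) hble] at hbsuf
      have hbq : pvMpm w (p ++ [x]) - 1 ≤ pvMpm w p := pvMpm_max (by omega) hbsuf.1
      have := h4 _ hbq (hcand _ hbq hbsuf.1) hbsuf.2.symm
      omega
  · rw [if_neg hx]
    have hr0 : r = 0 := by
      rcases h3 with h | h
      · exact absurd h hx
      · exact h
    rw [hr0]
    by_contra hne
    have hb1 : 1 ≤ pvMpm w (p ++ [x]) := by omega
    have hbsuf := pvMpm_suffix w (p ++ [x])
    have hble := pvMpm_le w (p ++ [x])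
    rw [hstep1 (pvMpm w (p ++ [x])) hb1 hble] at hbsuf
    have hbq : pvMpm w (p ++ [x]) - 1 ≤ pvMpm w p := pvMpm_max (by omega) hbsuf.1
    have hler := h4 _ hbq (hcand _ hbq hbsuf.1) hbsuf.2.symm
    rw [hr0] at hler
    have hbone : pvMpm w (p ++ [x]) = 1 := by omega
    apply hx
    rw [hr0]
    have := hbsuf.2
    rw [hbone] at this
    simpa using this.symm

-- ---- matches ----

theorem pvMatchIff {t w : List String} {s : Nat} (hw : w ≠ []) :
    ((t.drop s).take w.length = w) ↔ (s + w.length ≤ t.length ∧ w <:+ t.take (s + w.length)) := by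
  have hw1 : 1 ≤ w.length := List.length_pos_of_ne_nil hw
  constructor
  · intro h
    have hlen := congrArg List.length h
    simp only [List.length_take, List.length_drop] at hlen
    have hsm : s + w.length ≤ t.length := by omega
    refine ⟨hsm, ?_⟩
    rw [List.suffix_iff_eq_drop]
    have hl2 : (t.take (s + w.length)).length = s + w.length := by
      rw [List.length_take]; omega
    rw [hl2, show s + w.length - w.length = s by omega, List.drop_take,
      show s + w.length - s = w.length by omega, h]
  · rintro ⟨hsm, hsuf⟩
    rw [List.suffix_iff_eq_drop] at hsuf
    have hl2 : (t.take (s + w.length)).length = s + w.length := by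
      rw [List.length_take]; omega
    rw [hl2, show s + w.length - w.length = s by omega, List.drop_take,
      show s + w.length - s = w.length by omega] at hsuf
    exact hsuf.symm

-- canonical result: position of the first match
def pvFirst (t w : List String) : Option Nat :=
  (List.range (t.length + 1 - w.length)).find? (fun s => decide ((t.drop s).take w.length = w))

def pvOut (t w : List String) : Option (Int × Int) :=
  (pvFirst t w).map (fun s => ((s : Int), (s : Int) + (w.length : Int)))

-- ---- A computes pvOut ----

theorem pvLoopA_eq (tokens w : List String) (m : Int) : ∀ l : List Int,
    fwpLoopA tokens w m l
      = (l.find? (fun i => decide (PySem.List.pyGet? tokens i = PySem.List.pyGet? w 0) &&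
          decide (PySem.List.slice tokens (some (i + 1)) (some (i + m)) = PySem.List.slice w (some 1) none))).map
          (fun i => (i, i + m)) := by
  intro l
  induction l with
  | nil => rfl
  | cons i rest ih =>
    by_cases h1 : PySem.List.pyGet? tokens i = PySem.List.pyGet? w 0
    · by_cases h2 : PySem.List.slice tokens (some (i + 1)) (some (i + m)) = PySem.List.slice w (some 1) none
      · simp [fwpLoopA, h1, h2]
      · simp [fwpLoopA, h1, h2, ih]
    · simp [fwpLoopA, h1, ih]

theorem pvCondIff {tokens w : List String} (hw : w ≠ []) {s : Nat} (hs : s + w.length ≤ tokens.length) :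
    (PySem.List.pyGet? tokens (s : Int) = PySem.List.pyGet? w 0 ∧
      PySem.List.slice tokens (some ((s : Int) + 1)) (some ((s : Int) + (w.length : Int))) =
        PySem.List.slice w (some 1) none) ↔ (tokens.drop s).take w.length = w := by
  rcases w with _ | ⟨w0, wt⟩
  · exact absurd rfl hw
  have hsn : s < tokens.length := by
    simp only [List.length_cons] at hs; omega
  rw [PySem.List.pyGet?_natCast, PySem.List.pyGet?_zero_cons, List.getElem?_eq_getElem hsn]
  rw [show ((s : Int) + 1) = ((s + 1 : Nat) : Int) by push_cast; ring]
  rw [show ((s : Int) + (((w0 :: wt) : List String).length : Int)) = ((s + (w0 :: wt).length : Nat) : Int) by push_cast; ring]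
  rw [PySem.List.slice_natCast]
  rw [show (1 : Int) = ((1 : Nat) : Int) by simp]
  rw [PySem.List.slice_from_natCast]
  rw [show s + (w0 :: wt).length - (s + 1) = wt.length by simp; omega]
  rw [List.drop_eq_getElem_cons hsn]
  rw [show ((w0 :: wt) : List String).length = wt.length + 1 from rfl, List.take_succ_cons]
  simp [List.cons.injEq, Option.some.injEq]

theorem pvA_eq (tokens : List String) (word : String) :
    find_word_position tokens word
      = pvOut tokens ((PySem.Chars.splitOn word.toList ['_']).map String.ofList) := by
  set w := (PySem.Chars.splitOn word.toList ['_']).map String.ofList with hwdef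
  have hw : w ≠ [] := by
    rw [hwdef]
    simp only [ne_eq, List.map_eq_nil_iff]
    exact pvSplitNeNil _ _
  show fwpLoopA tokens w (w.length : Int)
      (PySem.List.pyRange 0 ((tokens.length : Int) - (w.length : Int) + 1) 1) = pvOut tokens w
  rw [pvLoopA_eq, PySem.List.pyRange_one, List.find?_map, Option.map_map]
  rw [show (((tokens.length : Int) - (w.length : Int) + 1) - 0).toNat = tokens.length + 1 - w.length by omega]
  unfold pvOut pvFirst
  rw [pvFindCongr (q := fun s => decide ((tokens.drop s).take w.length = w)) ?_]
  · cases (List.range (tokens.length + 1 - w.length)).find?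
      (fun s => decide ((tokens.drop s).take w.length = w)) with
    | none => rfl
    | some s => simp
  · intro x hx
    have hxr := List.mem_range.mp hx
    have hxm : x + w.length ≤ tokens.length := by omega
    simp only [Function.comp_apply, zero_add]
    rw [Bool.eq_iff_iff]
    simp only [Bool.and_eq_true, decide_eq_true_eq]
    exact pvCondIff hw hxm

-- ---- B computes pvOut ----

theorem pvScanInv {tokens w : List String} (hw : w ≠ []) :
    ∀ (rest p : List String) (q : Nat), tokens = p ++ rest → q = pvMpm w p → q < w.length →
    (∀ j, j ≤ p.length → pvMpm w (tokens.take j) < w.length) →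
    kmpScan w (kmpFail w) w.length rest (p.length : Int) q = pvOut tokens w := by
  intro rest
  induction rest with
  | nil =>
    intro p q h1 h2 h3 h4
    have hfn : pvFirst tokens w = none := by
      unfold pvFirst
      apply List.find?_eq_none.mpr
      intro s hs
      simp only [decide_eq_true_eq]
      intro hmatch
      obtain ⟨hm1, hm2⟩ := (pvMatchIff hw).mp hmatch
      have hge : w.length ≤ pvMpm w (tokens.take (s + w.length)) := by
        apply pvMpm_max le_rfl
        rw [List.take_length]
        exact hm2
      have hplen : tokens.length = p.length := by rw [h1, List.append_nil]
      have := h4 (s + w.length) (by omega)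
      omega
    simp only [kmpScan]
    rw [pvOut, hfn]
    rfl
  | cons x rest' ih =>
    intro p q h1 h2 h3 h4
    have hcons : ∀ (F : List Nat) (m : Nat) (tok : String) (rst : List String) (i : Int) (qq : Nat),
        kmpScan w F m (tok :: rst) i qq
          = (if (if tok = w.getD (kmpSpin w F tok qq qq) "" then kmpSpin w F tok qq qq + 1 else kmpSpin w F tok qq qq) = m
             then some (i - (m : Int) + 1, i + 1)
             else kmpScan w F m rst (i + 1)
               (if tok = w.getD (kmpSpin w F tok qq qq) "" then kmpSpin w F tok qq qq + 1 else kmpSpin w F tok qq qq)) :=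
      fun _ _ _ _ _ _ => rfl
    subst h2
    rw [hcons, pvScanStep hw h3]
    have htake : tokens.take (p.length + 1) = p ++ [x] := by
      rw [h1, List.take_append, List.take_of_length_le (by omega),
        show p.length + 1 - p.length = 1 by omega]
      rfl
    by_cases hq2 : pvMpm w (p ++ [x]) = w.length
    · rw [if_pos hq2]
      have hsuf : w <:+ (p ++ [x]) := by
        have h := pvMpm_suffix w (p ++ [x])
        rw [hq2, List.take_length] at h
        exact h
      have hmlen : w.length ≤ p.length + 1 := by
        have := hsuf.length_le
        simpa using this
      have htlen : p.length + 1 ≤ tokens.length := by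
        rw [h1]; simp
      have hfind : pvFirst tokens w = some (p.length + 1 - w.length) := by
        unfold pvFirst
        apply pvFindRangeSome
        · rw [decide_eq_true_eq]
          apply (pvMatchIff hw).mpr
          rw [show p.length + 1 - w.length + w.length = p.length + 1 by omega]
          exact ⟨htlen, htake ▸ hsuf⟩
        · omega
        · intro s hslt
          rw [decide_eq_false_iff_not]
          intro hmatch
          obtain ⟨hm1, hm2⟩ := (pvMatchIff hw).mp hmatch
          have hge : w.length ≤ pvMpm w (tokens.take (s + w.length)) := by
            apply pvMpm_max le_rfl
            rw [List.take_length]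
            exact hm2
          have := h4 (s + w.length) (by omega)
          omega
      have hout : pvOut tokens w = some (((p.length + 1 - w.length : Nat) : Int),
          ((p.length + 1 - w.length : Nat) : Int) + (w.length : Int)) := by
        rw [pvOut, hfind]
        rfl
      rw [hout, Option.some.injEq, Prod.mk.injEq]
      constructor <;> omega
    · rw [if_neg hq2]
      have hlen : ((p ++ [x]).length : Int) = (p.length : Int) + 1 := by
        simp
      rw [show (p.length : Int) + 1 = ((p ++ [x]).length : Int) from hlen.symm]
      apply ih (p ++ [x]) (pvMpm w (p ++ [x]))
      · rw [h1]; simp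
      · rfl
      · exact lt_of_le_of_ne (pvMpm_le _ _) hq2
      · intro j hj
        simp only [List.length_append, List.length_cons, List.length_nil] at hj
        by_cases hjp : j ≤ p.length
        · exact h4 j hjp
        · have hj1 : j = p.length + 1 := by omega
          rw [hj1, htake]
          exact lt_of_le_of_ne (pvMpm_le _ _) hq2

theorem pvB_eq (tokens : List String) (word : String) :
    find_word_position_alt tokens word
      = pvOut tokens ((PySem.Chars.splitOn word.toList ['_']).map String.ofList) := by
  set w := (PySem.Chars.splitOn word.toList ['_']).map String.ofList with hwdef
  have hw : w ≠ [] := by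
    rw [hwdef]
    simp only [ne_eq, List.map_eq_nil_iff]
    exact pvSplitNeNil _ _
  show kmpScan w (kmpFail w) w.length tokens 0 0 = pvOut tokens w
  have h := pvScanInv (tokens := tokens) hw tokens [] 0 (by simp) (pvMpm_nil w).symm
    (List.length_pos_of_ne_nil hw) ?_
  · exact h
  · intro j hj
    simp only [List.length_nil, Nat.le_zero] at hj
    subst hj
    rw [List.take_zero]
    rw [show pvMpm w [] = 0 from pvMpm_nil w]
    exact List.length_pos_of_ne_nil hw

-- ===== VERDICT (by name: the statement is the Claim_ definition above) =====
theorem find_word_position_spec : Claim_equal_find_word_position := by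
  intro tokens word _
  unfold Spec_find_word_position
  rw [pvA_eq, pvB_eq]
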